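-- pv_equiv track=rewrite | github.com/memolp/Performance-Test-Client | core/VUtils.py | GetHashCode
-- ===== SOURCE A (Python) =====
-- def __convert_n_bytes(n, b):
--     bits = b*8
--     return (n + 2**(bits-1)) % 2**bits - 2**(bits-1)
--
-- def __convert_4_bytes(n):
--     return __convert_n_bytes(n, 4)
--
-- def GetHashCode(s):
--     """
--     获取字符串的hash值(类java)
--     :param s:
--     :return:
--     """
--     h = 0
--     n = len(s)
--
--     if isinstance(s,bytes):
--         s = s.decode()
--
--     for i, c in enumerate(s):
--         h = h + ord(c)*31**(n-1-i)
--     return __convert_4_bytes(h)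
-- ===== SOURCE B (Python) =====
-- def GetHashCode(s):
--     if isinstance(s, bytes):
--         s = s.decode()
--     h = 0
--     for c in s:
--         h = (h * 31 + ord(c)) % 2**32
--     return h - 2**32 if h >= 2**31 else h
-- ===== Notes on version B (the rewrite author's own statement) =====
-- stated objective: faster
-- what changed: Replaces the per-character bignum power 31**(n-1-i) summed into an unbounded integer with Horner's rule keeping a running accumulator reduced mod 2**32 at every step, then a direct signed-32-bit adjustment.
import Mathlib
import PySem

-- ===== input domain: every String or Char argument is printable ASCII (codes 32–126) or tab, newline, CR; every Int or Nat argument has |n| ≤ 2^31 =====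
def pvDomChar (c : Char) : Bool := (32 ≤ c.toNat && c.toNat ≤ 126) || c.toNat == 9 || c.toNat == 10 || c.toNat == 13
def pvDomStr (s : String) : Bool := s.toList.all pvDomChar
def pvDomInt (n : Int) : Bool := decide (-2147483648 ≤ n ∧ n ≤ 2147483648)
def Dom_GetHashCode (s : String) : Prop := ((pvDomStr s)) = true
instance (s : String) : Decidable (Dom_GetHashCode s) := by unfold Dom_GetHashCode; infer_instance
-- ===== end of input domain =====

-- B replaces A's bignum sum of ord(c)*31**(n-1-i) by Horner's rule with a running mod-2^32 accumulator (faster); return value only.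

-- ===== PORT A =====
-- __convert_n_bytes(n, b)
def convertNBytes (n : Int) (b : Int) : Int :=
  let bits := b * 8
  PySem.Int.mod (n + 2 ^ (bits - 1).toNat) (2 ^ bits.toNat) - 2 ^ (bits - 1).toNat

-- __convert_4_bytes(n)
def convert4Bytes (n : Int) : Int := convertNBytes n 4

def GetHashCode (s : String) : Int :=
  let cs := s.toList
  let n : Int := cs.length
  -- for i, c in enumerate(s): h = h + ord(c)*31**(n-1-i)   (n-1-i ≥ 0 throughout the loop)
  let h := (PySem.List.enumerate cs).foldl
      (fun h ic => h + (ic.2.toNat : Int) * 31 ^ (n - 1 - ic.1).toNat) 0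
  convert4Bytes h

-- ===== PORT B =====
def GetHashCode_alt (s : String) : Int :=
  let h := s.toList.foldl (fun h c => PySem.Int.mod (h * 31 + (c.toNat : Int)) (2 ^ 32)) 0
  if h ≥ 2 ^ 31 then h - 2 ^ 32 else h

-- ===== PRECONDITION & SPEC =====
def Spec_GetHashCode (s : String) (out : Int) : Prop := out = GetHashCode_alt s
instance (s : String) (out : Int) : Decidable (Spec_GetHashCode s out) := by unfold Spec_GetHashCode; infer_instance

-- ===== CLAIM (what is proved, stated in full; the proofs are below) =====
def Claim_equal_GetHashCode : Prop := ∀ (s : String), Dom_GetHashCode s → Spec_GetHashCode s (GetHashCode s)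

-- ===== LEMMAS AND PROOFS =====

-- plain Horner fold (the unreduced value both sides are related to)
def pvHorner (a : Int) (cs : List Char) : Int :=
  cs.foldl (fun h c => h * 31 + (c.toNat : Int)) a

theorem pvHorner_shift (cs : List Char) (a : Int) :
    pvHorner a cs = a * 31 ^ cs.length + pvHorner 0 cs := by
  induction cs generalizing a with
  | nil => simp [pvHorner]
  | cons c cs ih =>
    simp only [pvHorner, List.foldl_cons, List.length_cons] at *
    rw [ih (a * 31 + c.toNat), ih ((0:Int) * 31 + c.toNat)]
    ring

-- A's indexed-power fold equals the Horner value
theorem pvAfold (cs : List Char) (n k h : Int) (hk : k + cs.length = n) :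
    (PySem.List.enumerate cs k).foldl
        (fun h ic => h + (ic.2.toNat : Int) * 31 ^ (n - 1 - ic.1).toNat) h
      = h + pvHorner 0 cs := by
  induction cs generalizing k h with
  | nil => simp [PySem.List.enumerate, pvHorner]
  | cons c cs ih =>
    simp only [PySem.List.enumerate, List.foldl_cons, List.length_cons] at *
    rw [ih (k + 1) _ (by omega)]
    have he : (n - 1 - k).toNat = cs.length := by omega
    rw [he]
    have hcons : pvHorner 0 (c :: cs) = pvHorner ((0:Int) * 31 + (c.toNat : Int)) cs := rfl
    rw [hcons]
    rw [show ((0:Int) * 31 + (c.toNat : Int)) = (c.toNat : Int) by ring, pvHorner_shift cs (c.toNat : Int)]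
    ring

-- B's reduced fold equals the Horner value mod 2^32
theorem pvBfold (cs : List Char) (h : Int) :
    cs.foldl (fun h c => PySem.Int.mod (h * 31 + (c.toNat : Int)) (2 ^ 32)) (h % 2 ^ 32)
      = pvHorner h cs % 2 ^ 32 := by
  induction cs generalizing h with
  | nil => simp [pvHorner]
  | cons c cs ih =>
    simp only [pvHorner, List.foldl_cons] at *
    rw [PySem.Int.mod_eq_emod_of_pos (by norm_num)]
    have : (h % 2 ^ 32 * 31 + (c.toNat : Int)) % 2 ^ 32 = (h * 31 + (c.toNat : Int)) % 2 ^ 32 := by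
      omega
    rw [this, ← ih (h * 31 + c.toNat)]

-- ===== VERDICT (by name: the statement is the Claim_ definition above) =====
theorem GetHashCode_spec : Claim_equal_GetHashCode := by
  intro s _
  unfold Spec_GetHashCode GetHashCode GetHashCode_alt convert4Bytes convertNBytes
  simp only []
  rw [pvAfold s.toList s.toList.length 0 0 (by simp)]
  have hb : s.toList.foldl (fun h c => PySem.Int.mod (h * 31 + (c.toNat : Int)) (2 ^ 32)) 0
      = pvHorner 0 s.toList % 2 ^ 32 := by
    have := pvBfold s.toList 0
    simpa using this
  rw [hb]
  rw [PySem.Int.mod_eq_emod_of_pos (by norm_num)]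
  set S := pvHorner 0 s.toList with hS
  have e1 : ((4:Int) * 8 - 1).toNat = 31 := rfl
  have e2 : ((4:Int) * 8).toNat = 32 := rfl
  rw [e1, e2]
  norm_num
  omega
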